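-- pv_equiv track=rewrite | github.com/jaydeepborkar/semantic-memorization | filters/highly_repetitive.py | break_and_compare
-- ===== SOURCE A (Python) =====
-- def break_and_compare(ls: list, k: int) -> list:
--     """
--     This function takes a list ls and an integer k as input and returns a list which is the first chunk of ls that is repeated k times. If no such chunk exists, it returns an empty list.
--
--     Parameters:
--
--         ls (list): The input list.
--         k (int): The integer value used for splitting and comparing the list.
--
--     """
--     n = len(ls)
--     while n % k != 0:
--         n -= 1
--     to_break = ls[:n]
--     residual = ls[n:]
--     chunk_size = n // k
--     while len(residual) < chunk_size:
--         # split into chunks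
--         chunks = [to_break[i:i + chunk_size] for i in range(0, len(to_break), chunk_size)]
--         chunksMatch = True
--         # compare all chunks to first chunk
--         for chunk in chunks[1:]:
--             if chunk != chunks[0]:
--                 chunksMatch = False
--                 break
--         if chunksMatch:
--             # compare residual to first chunk
--             if residual == chunks[0][:len(residual)]:
--                 return chunks[0]
--         chunk_size -= 1
--         new_residual = to_break[chunk_size * k:]
--         to_break = to_break[:chunk_size * k]
--         residual = new_residual + residual
--     return []
-- ===== SOURCE B (Python) =====
-- def break_and_compare(ls: list, k: int) -> list:
--     if k <= 0:
--         return []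
--     n = len(ls)
--     for c in range(n // k, n // (k + 1), -1):
--         if ls[c:] == ls[:n - c]:
--             return ls[:c]
--     return []
-- ===== Notes on version B (the rewrite author's own statement) =====
-- stated objective: faster
-- what changed: A's while-loop that re-splits to_break into k chunks, compares every chunk to the first and shuffles a to_break/residual state is replaced by a direct descending for-loop over the candidate chunk sizes range(n//k, n//(k+1), -1) with a single shift comparison ls[c:] == ls[:n-c] (c-periodicity) per candidate.
import Mathlib
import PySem

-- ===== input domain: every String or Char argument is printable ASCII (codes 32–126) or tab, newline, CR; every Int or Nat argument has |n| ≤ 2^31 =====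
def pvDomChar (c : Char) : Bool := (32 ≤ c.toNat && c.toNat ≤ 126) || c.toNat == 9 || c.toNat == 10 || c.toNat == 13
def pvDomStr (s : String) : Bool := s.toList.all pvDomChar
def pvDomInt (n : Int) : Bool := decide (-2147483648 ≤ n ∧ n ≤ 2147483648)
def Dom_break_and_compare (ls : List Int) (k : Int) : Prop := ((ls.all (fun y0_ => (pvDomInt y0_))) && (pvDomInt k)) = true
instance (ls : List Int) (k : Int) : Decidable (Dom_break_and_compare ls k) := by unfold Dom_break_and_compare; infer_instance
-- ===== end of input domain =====

-- B replaces A's chunk-splitting while-loop (rebuild all k chunks, compare each to the first,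
-- shuffle to_break/residual state) by a direct descending for-loop over the candidate chunk
-- sizes with one shift comparison ls[c:] == ls[:n-c] per candidate; return value only
-- (neither version mutates its arguments).

-- ===== PORT A =====
-- while n % k != 0: n -= 1   (one recursion step per decrement of the Nat n)
def bcFindN (k : Int) : Nat → Nat
  | 0 => 0
  | n + 1 => if PySem.Int.mod ((n : Int) + 1) k ≠ 0 then bcFindN k n else n + 1

-- chunks = [to_break[i:i + chunk_size] for i in range(0, len(to_break), chunk_size)]
def bcChunks (toBreak : List Int) (chunkSize : Int) : List (List Int) :=
  (PySem.List.pyRange 0 (PySem.List.len toBreak) chunkSize).map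
    (fun i => PySem.List.slice toBreak (some i) (some (i + chunkSize)))

-- the second while loop; fuel = chunkSize.toNat + 1 bounds the number of remaining
-- iterations (chunk_size strictly decreases and the loop exits once chunk_size ≤
-- len(residual) ⊇ chunk_size ≤ 0).  Python's chunks[0] is ported as chunks.headD []:
-- whenever the loop body runs, chunk_size ≥ 1 and len(to_break) = chunk_size*k ≥ 1,
-- so chunks ≠ [] and chunks[0] never raises there.  The chunksMatch for-loop with
-- early break is the all-check on chunks[1:], which has the same early-exit result.
def bcLoop (k : Int) : List Int → List Int → Int → Nat → List Int
  | _, _, _, 0 => []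
  | toBreak, residual, chunkSize, fuel + 1 =>
    if PySem.List.len residual < chunkSize then
      if ((PySem.List.slice (bcChunks toBreak chunkSize) (some 1) none).all
            (fun ch => ch == (bcChunks toBreak chunkSize).headD []))
          && (residual == PySem.List.slice ((bcChunks toBreak chunkSize).headD [])
                (some 0) (some (PySem.List.len residual))) then
        (bcChunks toBreak chunkSize).headD []
      else
        bcLoop k (PySem.List.slice toBreak none (some ((chunkSize - 1) * k)))
          (PySem.List.slice toBreak (some ((chunkSize - 1) * k)) none ++ residual)
          (chunkSize - 1) fuel
    else []

def break_and_compare (ls : List Int) (k : Int) : List Int :=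
  let n := bcFindN k ls.length
  let toBreak := PySem.List.slice ls none (some (n : Int))
  let residual := PySem.List.slice ls (some (n : Int)) none
  let chunkSize := PySem.Int.floordiv (n : Int) k
  bcLoop k toBreak residual chunkSize (chunkSize.toNat + 1)

-- ===== PORT B =====
-- for c in range(n // k, n // (k + 1), -1): if ls[c:] == ls[:n - c]: return ls[:c]
def bcAltGo (ls : List Int) (n : Int) : List Int → List Int
  | [] => []
  | c :: cs =>
    if PySem.List.slice ls (some c) none == PySem.List.slice ls none (some (n - c)) then
      PySem.List.slice ls none (some c)
    else bcAltGo ls n cs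

def break_and_compare_alt (ls : List Int) (k : Int) : List Int :=
  if k ≤ 0 then []
  else
    let n := PySem.List.len ls
    bcAltGo ls n (PySem.List.pyRange (PySem.Int.floordiv n k) (PySem.Int.floordiv n (k + 1)) (-1))

-- ===== PRECONDITION & SPEC =====
-- Pre_ excludes only k = 0, where Python A raises ZeroDivisionError on n % k.
def Pre_break_and_compare (ls : List Int) (k : Int) : Prop := k ≠ 0
instance (ls : List Int) (k : Int) : Decidable (Pre_break_and_compare ls k) := by
  unfold Pre_break_and_compare; infer_instance
def pvWitness_break_and_compare : List Int × Int := ([1, 2, 1, 2, 1], 2)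

def Spec_break_and_compare (ls : List Int) (k : Int) (out : List Int) : Prop := out = break_and_compare_alt ls k
instance (ls : List Int) (k : Int) (out : List Int) : Decidable (Spec_break_and_compare ls k out) := by unfold Spec_break_and_compare; infer_instance

-- ===== CLAIM (what is proved, stated in full; the proofs are below) =====
def Claim_equal_break_and_compare : Prop := ∀ (ls : List Int) (k : Int), Dom_break_and_compare ls k → Pre_break_and_compare ls k → Spec_break_and_compare ls k (break_and_compare ls k)

-- ===== LEMMAS AND PROOFS =====

-- bcFindN m is the largest multiple of K that is ≤ m (for k = (K : Int), 1 ≤ K)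
theorem bcFindN_spec (K : Nat) (hK : 1 ≤ K) (m : Nat) :
    K ∣ bcFindN (K : Int) m ∧ bcFindN (K : Int) m ≤ m ∧ m < bcFindN (K : Int) m + K := by
  induction m with
  | zero => exact ⟨⟨0, rfl⟩, le_refl 0, by omega⟩
  | succ n ih =>
    rcases ih with ⟨hd, hle, hlt⟩
    have hcast : ((n : Int) + 1) = ((n + 1 : Nat) : Int) := by push_cast; ring
    have hdvd_iff : ((K : Int) ∣ ((n : Int) + 1)) ↔ (K ∣ (n + 1)) := by
      rw [hcast]; exact_mod_cast Iff.rfl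
    by_cases h : K ∣ (n + 1)
    · have e : bcFindN (K : Int) (n + 1) = n + 1 := by
        rw [bcFindN]
        simp [PySem.Int.mod_eq_zero_iff_dvd, hdvd_iff, h]
      exact ⟨by rw [e]; exact h, by omega, by omega⟩
    · have e : bcFindN (K : Int) (n + 1) = bcFindN (K : Int) n := by
        rw [bcFindN]
        simp [PySem.Int.mod_eq_zero_iff_dvd, hdvd_iff, h]
      rw [e]
      refine ⟨hd, by omega, ?_⟩
      rcases Nat.lt_or_ge (n + 1) (bcFindN (K : Int) n + K) with h1 | h1
      · exact h1
      · exact absurd (by rw [show n + 1 = bcFindN (K : Int) n + K by omega]; exact Dvd.dvd.add hd dvd_rfl) h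

-- the pivot predicate both loop conditions are equivalent to: ls is c-periodic
def Periodic (ls : List Int) (c : Nat) : Prop :=
  ∀ q, q < ls.length → ls[q]? = ls[q % c]?

-- B's per-candidate test  ls[c:] == ls[:n-c]  tests c-periodicity
theorem shift_iff_periodic (ls : List Int) (c : Nat) (hc : 1 ≤ c) (hcn : c ≤ ls.length) :
    (ls.drop c = ls.take (ls.length - c)) ↔ Periodic ls c := by
  constructor
  · intro hB q hq
    induction q using Nat.strong_induction_on with
    | _ q ih =>
      by_cases hqc : q < c
      · rw [Nat.mod_eq_of_lt hqc]
      · have h1 : (ls.drop c)[q - c]? = (ls.take (ls.length - c))[q - c]? := by rw [hB]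
        rw [List.getElem?_drop, List.getElem?_take, if_pos (by omega : q - c < ls.length - c)] at h1
        rw [show c + (q - c) = q by omega] at h1
        rw [h1, ih (q - c) (by omega) (by omega), ← Nat.mod_eq_sub_mod (by omega)]
  · intro hP
    apply List.ext_getElem?
    intro i
    by_cases hi : i < ls.length - c
    · rw [List.getElem?_drop, List.getElem?_take, if_pos hi, hP (c + i) (by omega),
        hP i (by omega), Nat.add_mod_left]
    · rw [List.getElem?_eq_none (by simp; omega), List.getElem?_eq_none (by simp; omega)]

-- A's per-candidate test (all chunks equal the first one, residual a prefix of it)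
-- tests the same c-periodicity
theorem chunks_iff_periodic (ls : List Int) (c K : Nat) (hc : 1 ≤ c) (hK : 1 ≤ K)
    (hck : c * K ≤ ls.length) (hres : ls.length - c * K < c) :
    ((∀ j, j < K → (ls.drop (j * c)).take c = ls.take c) ∧
      ls.drop (c * K) = (ls.take c).take (ls.length - c * K)) ↔ Periodic ls c := by
  have hcK : c ≤ c * K := Nat.le_mul_of_pos_right c hK
  constructor
  · rintro ⟨hch, hres2⟩ q hq
    by_cases hqk : q < c * K
    · have hj : q / c < K := by
        rw [Nat.div_lt_iff_lt_mul (by omega), Nat.mul_comm]; omega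
      have h1 : ((ls.drop (q / c * c)).take c)[q % c]? = (ls.take c)[q % c]? := by
        rw [hch (q / c) hj]
      have hmod : q % c < c := Nat.mod_lt _ (by omega)
      rw [List.getElem?_take, if_pos hmod, List.getElem?_take, if_pos hmod,
        List.getElem?_drop] at h1
      rw [show q / c * c + q % c = q by rw [Nat.mul_comm]; exact Nat.div_add_mod q c] at h1
      exact h1
    · have h1 : (ls.drop (c * K))[q - c * K]? = ((ls.take c).take (ls.length - c * K))[q - c * K]? := by
        rw [hres2]
      rw [List.getElem?_drop, List.getElem?_take, if_pos (by omega : q - c * K < ls.length - c * K),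
        List.getElem?_take, if_pos (by omega : q - c * K < c)] at h1
      rw [show c * K + (q - c * K) = q by omega] at h1
      have hqmod : q % c = q - c * K := by
        conv_lhs => rw [show q = (q - c * K) + c * K by omega]
        rw [Nat.add_mul_mod_self_left, Nat.mod_eq_of_lt (by omega)]
      rw [h1, hqmod]
  · intro hP
    constructor
    · intro j hj
      have hjc : j * c + c ≤ c * K := by
        have h2 : (j + 1) * c ≤ K * c := Nat.mul_le_mul_right c hj
        have h3 : (j + 1) * c = j * c + c := by ring
        have h4 : K * c = c * K := Nat.mul_comm _ _
        omega
      apply List.ext_getElem?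
      intro i
      by_cases hi : i < c
      · rw [List.getElem?_take, if_pos hi, List.getElem?_take, if_pos hi, List.getElem?_drop,
          hP (j * c + i) (by omega), hP i (by omega),
          show (j * c + i) % c = i % c by rw [Nat.add_comm, Nat.add_mul_mod_self_right]]
      · rw [List.getElem?_eq_none (by simp; omega), List.getElem?_eq_none (by simp; omega)]
    · apply List.ext_getElem?
      intro i
      by_cases hi : i < ls.length - c * K
      · rw [List.getElem?_drop, List.getElem?_take, if_pos hi, List.getElem?_take,
          if_pos (by omega : i < c),
          hP (c * K + i) (by omega), hP i (by omega),
          show (c * K + i) % c = i % c by rw [Nat.add_comm, Nat.add_mul_mod_self_left]]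
      · rw [List.getElem?_eq_none (by simp; omega), List.getElem?_eq_none (by simp; omega)]

-- A's chunk comprehension over to_break = ls[:c*K] is the list of the K segments of length c
theorem bcChunks_eq (ls : List Int) (c K : Nat) (hc : 1 ≤ c) (hK : 1 ≤ K)
    (hck : c * K ≤ ls.length) :
    bcChunks (ls.take (c * K)) (c : Int) =
      (List.range K).map (fun j => (ls.drop (j * c)).take c) := by
  have hlen : (ls.take (c * K)).length = c * K := by simp; omega
  have hcount : ((((c * K : Nat) : Int) - 0 + (c : Int) - 1) / (c : Int)).toNat = K := by
    have h1 : (((c * K : Nat) : Int) - 0 + (c : Int) - 1) = ((c * K + (c - 1) : Nat) : Int) := by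
      push_cast; omega
    have h2 : (c * K + (c - 1)) / c = K := by
      rw [Nat.mul_add_div (by omega), Nat.div_eq_of_lt (by omega)]
      omega
    rw [h1, ← Int.natCast_div, h2]; simp
  rw [bcChunks, PySem.List.len_eq, hlen,
    PySem.List.pyRange_of_pos 0 ((c * K : Nat) : Int) (by exact_mod_cast hc),
    if_pos (by exact_mod_cast Nat.mul_pos hc hK : (0 : Int) < ((c * K : Nat) : Int)), hcount,
    List.map_map]
  apply List.map_congr_left
  intro j hj
  rw [List.mem_range] at hj
  have h3 : (0 : Int) + (c : Int) * (j : Int) = ((c * j : Nat) : Int) := by push_cast; ring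
  simp only [Function.comp_apply, h3]
  have h4 : ((c * j : Nat) : Int) + (c : Int) = ((c * j : Nat) : Int) + ((c : Nat) : Int) := by norm_num
  rw [h4, PySem.List.slice_natCast_add, List.drop_take, List.take_take]
  have h5 : c * (j + 1) ≤ c * K := Nat.mul_le_mul_left c hj
  have h6 : c * (j + 1) = c * j + c := by ring
  rw [Nat.min_eq_left (by omega), Nat.mul_comm c j]

-- reassembling A's sliding state: to_break[c'*k:] + residual recovers ls[c'*k:]
theorem drop_take_append_drop (ls : List Int) (a b : Nat) (hab : a ≤ b) :
    (ls.take b).drop a ++ ls.drop b = ls.drop a := by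
  rw [List.drop_take, show ls.drop b = (ls.drop a).drop (b - a) by
    rw [List.drop_drop]; congr 1; omega]
  exact List.take_append_drop _ _

-- the main correspondence: at every loop entry of A with chunk size c, state
-- (ls[:c*K], ls[c*K:]), A's remaining computation equals B's scan of the remaining
-- candidate range range(c, len(ls)//(K+1), -1)
theorem loop_eq (ls : List Int) (K : Nat) (hK : 1 ≤ K) :
    ∀ fuel c, c + 1 ≤ fuel → c ≤ ls.length / K →
    bcLoop (K : Int) (ls.take (c * K)) (ls.drop (c * K)) (c : Int) fuel =
      bcAltGo ls (ls.length : Int)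
        (PySem.List.pyRange (c : Int) ((ls.length / (K + 1) : Nat) : Int) (-1)) := by
  intro fuel
  induction fuel with
  | zero => intro c h1 _; omega
  | succ fuel ih =>
    intro c hfuel hcdiv
    have hck : c * K ≤ ls.length := by
      calc c * K ≤ ls.length / K * K := Nat.mul_le_mul_right K hcdiv
        _ ≤ ls.length := Nat.div_mul_le_self _ _
    have hreslen : PySem.List.len (ls.drop (c * K)) = ((ls.length - c * K : Nat) : Int) := by
      rw [PySem.List.len_eq, List.length_drop]
    rw [bcLoop, hreslen]
    by_cases hcond : ls.length - c * K < c
    · rw [if_pos (by exact_mod_cast hcond)]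
      have hc : 1 ≤ c := by by_contra h; omega
      have hcn : c ≤ ls.length := le_trans (Nat.le_mul_of_pos_right c hK) hck
      obtain ⟨Kp, rfl⟩ : ∃ Kp, K = Kp + 1 := ⟨K - 1, by omega⟩
      rw [bcChunks_eq ls c (Kp + 1) hc hK hck]
      have hrange : ((List.range (Kp + 1)).map (fun j => (ls.drop (j * c)).take c)) =
          ls.take c :: (List.range Kp).map (fun j => (ls.drop ((j + 1) * c)).take c) := by
        rw [List.range_succ_eq_map, List.map_cons, List.map_map]
        simp [Function.comp, Nat.succ_eq_add_one]
      rw [hrange, PySem.List.slice_from_one]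
      simp only [List.tail_cons, List.headD_cons]
      -- A's Python condition, as the proposition of chunks_iff_periodic
      have hCA : (((List.range Kp).map (fun j => (ls.drop ((j + 1) * c)).take c)).all
            (fun ch => ch == ls.take c)
          && (ls.drop (c * (Kp + 1)) == PySem.List.slice (ls.take c) (some 0)
                (some ((ls.length - c * (Kp + 1) : Nat) : Int)))) = true ↔
          ((∀ j, j < Kp + 1 → (ls.drop (j * c)).take c = ls.take c) ∧
            ls.drop (c * (Kp + 1)) = (ls.take c).take (ls.length - c * (Kp + 1))) := by
        rw [Bool.and_eq_true, List.all_eq_true]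
        rw [PySem.List.slice_zero_start, PySem.List.slice_to_natCast]
        constructor
        · rintro ⟨h1, h2⟩
          refine ⟨?_, by rwa [beq_iff_eq] at h2⟩
          intro j hj
          rcases Nat.eq_zero_or_pos j with rfl | hj0
          · simp
          · have := h1 _ (List.mem_map_of_mem (List.mem_range.mpr (by omega : j - 1 < Kp))
              (f := fun j => (ls.drop ((j + 1) * c)).take c))
            rw [beq_iff_eq] at this
            rw [show j = (j - 1) + 1 by omega]
            exact this
        · rintro ⟨h1, h2⟩
          refine ⟨?_, by rw [beq_iff_eq]; exact h2⟩
          intro x hx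
          rw [List.mem_map] at hx
          obtain ⟨j, hj, rfl⟩ := hx
          rw [List.mem_range] at hj
          rw [beq_iff_eq]
          exact h1 (j + 1) (by omega)
      -- B's Python condition, as the proposition of shift_iff_periodic
      have hCB : (PySem.List.slice ls (some (c : Int)) none ==
            PySem.List.slice ls none (some ((ls.length : Int) - (c : Int)))) = true ↔
          ls.drop c = ls.take (ls.length - c) := by
        rw [show (ls.length : Int) - (c : Int) = ((ls.length - c : Nat) : Int) by omega,
          PySem.List.slice_from_natCast, PySem.List.slice_to_natCast, beq_iff_eq]
      have hlt : ((ls.length / (Kp + 1 + 1) : Nat) : Int) < (c : Int) := by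
        exact_mod_cast (Nat.div_lt_iff_lt_mul (by omega)).mpr (by
          have hexp : c * (Kp + 1 + 1) = c * (Kp + 1) + c := by ring
          omega)
      rw [PySem.List.pyRange_neg_one_cons hlt, bcAltGo]
      by_cases hP : Periodic ls c
      · rw [if_pos (hCA.mpr ((chunks_iff_periodic ls c (Kp + 1) hc hK hck hcond).mpr hP)),
          if_pos (hCB.mpr ((shift_iff_periodic ls c hc hcn).mpr hP)),
          PySem.List.slice_to_natCast]
      · rw [if_neg, if_neg]
        · have hc1 : ((c : Int) - 1) = ((c - 1 : Nat) : Int) := by omega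
          have hmul : ((c - 1 : Nat) : Int) * ((Kp + 1 : Nat) : Int) =
              (((c - 1) * (Kp + 1) : Nat) : Int) := by push_cast; ring
          have hle : (c - 1) * (Kp + 1) ≤ c * (Kp + 1) := Nat.mul_le_mul_right _ (by omega)
          rw [hc1, hmul, PySem.List.slice_to_natCast, PySem.List.slice_from_natCast,
            List.take_take, Nat.min_eq_left hle,
            drop_take_append_drop ls _ _ hle]
          exact ih (c - 1) (by omega) (by omega)
        · intro h
          exact hP ((shift_iff_periodic ls c hc hcn).mp (hCB.mp (by exact_mod_cast h)))
        · intro h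
          exact hP ((chunks_iff_periodic ls c (Kp + 1) hc hK hck hcond).mp (hCA.mp (by exact_mod_cast h)))
    · rw [if_neg (by exact_mod_cast hcond)]
      rw [PySem.List.pyRange_neg_one_eq_nil (by
        exact_mod_cast Nat.le_div_iff_mul_le (by omega) |>.mpr (by
          have hexp : c * (K + 1) = c * K + c := by ring
          omega) : (c : Int) ≤ _)]
      rfl

-- ===== VERDICT (by name: the statement is the Claim_ definition above) =====
theorem break_and_compare_spec : Claim_equal_break_and_compare := by
  intro ls k _ hk
  unfold Spec_break_and_compare break_and_compare break_and_compare_alt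
  by_cases hkpos : k ≤ 0
  · -- k < 0: chunk_size = n // k ≤ 0, A's loop body never runs; B returns [] directly
    have hklt : k < 0 := lt_of_le_of_ne hkpos hk
    rw [if_pos hkpos]
    have hdivle : PySem.Int.floordiv ((bcFindN k ls.length : Nat) : Int) k ≤ 0 := by
      have h1 := PySem.Int.mod_neg_bounds ((bcFindN k ls.length : Nat) : Int) hklt
      have h2 := PySem.Int.floordiv_mul_add_mod ((bcFindN k ls.length : Nat) : Int) k
      nlinarith [h1.1, h1.2, Int.natCast_nonneg (bcFindN k ls.length)]
    have hfuel : (PySem.Int.floordiv ((bcFindN k ls.length : Nat) : Int) k).toNat + 1 = 1 := by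
      omega
    simp only [hfuel]
    rw [bcLoop, if_neg]
    rw [PySem.List.len_eq]
    intro hlt
    have := Int.natCast_nonneg (PySem.List.slice ls (some ((bcFindN k ls.length : Nat) : Int)) none).length
    omega
  · -- k ≥ 1
    rw [if_neg hkpos]
    obtain ⟨K, rfl⟩ : ∃ K : Nat, k = (K : Int) := ⟨k.toNat, by omega⟩
    have hK : 1 ≤ K := by exact_mod_cast not_le.mp hkpos
    obtain ⟨hdvd, hle, hlt⟩ := bcFindN_spec K hK ls.length
    set n' := bcFindN (K : Int) ls.length with hn'
    have hc0 : n' / K * K = n' := Nat.div_mul_cancel hdvd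
    have hNdiv : ls.length / K = n' / K := by
      rw [Nat.div_eq_of_lt_le (le_of_eq_of_le hc0 hle) (by
        have : (n' / K + 1) * K = n' / K * K + K := by ring
        omega)]
    have hfloor : PySem.Int.floordiv ((n' : Nat) : Int) ((K : Nat) : Int) = ((n' / K : Nat) : Int) :=
      PySem.Int.floordiv_natCast n' K
    have hfloorN : PySem.Int.floordiv ((ls.length : Nat) : Int) ((K : Nat) : Int) = ((n' / K : Nat) : Int) := by
      rw [PySem.Int.floordiv_natCast, hNdiv]
    have hfloorN1 : PySem.Int.floordiv ((ls.length : Nat) : Int) (((K : Nat) : Int) + 1) =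
        ((ls.length / (K + 1) : Nat) : Int) := by
      rw [show ((K : Nat) : Int) + 1 = ((K + 1 : Nat) : Int) by push_cast; ring,
        PySem.Int.floordiv_natCast]
    simp only [hfloor, hfloorN, hfloorN1, Int.toNat_natCast,
      PySem.List.slice_to_natCast, PySem.List.slice_from_natCast, PySem.List.len_eq]
    rw [show ls.take n' = ls.take (n' / K * K) by rw [hc0],
      show ls.drop n' = ls.drop (n' / K * K) by rw [hc0]]
    exact loop_eq ls K hK (n' / K + 1) (n' / K) (by omega) (by omega)
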